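-- pv_equiv track=rewrite | github.com/yc3798/myleetcode | datastructure/myheap.py | poscount
-- ===== SOURCE A (Python) =====
-- def poscount(A, i, n):
-- 	if i >= n:
-- 		return 0
-- 	if A[i] <= 0:
-- 		return 0
-- 	left = poscount(A,2*i+1,n)
-- 	right = poscount(A,2*i+2,n)
-- 	pos = left+right+1
-- 	return pos
-- ===== SOURCE B (Python) =====
-- def poscount(A, i, n):
--     count = 0
--     stack = [i]
--     while stack:
--         j = stack.pop()
--         if j < n and A[j] > 0:
--             count += 1
--             stack.append(2*j+1)
--             stack.append(2*j+2)
--     return count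
-- ===== Notes on version B (the rewrite author's own statement) =====
-- stated objective: alternative
-- what changed: Replaced the recursive subtree count with an iterative explicit-stack (LIFO) traversal that keeps a running counter and pushes the two child indices of each counted node.
-- outside the precondition, e.g. on poscount([0], 0, 5): A returns 0, B returns 0; on poscount([1], 0, 2): A raises IndexError, B raises IndexError; on poscount([1, 2], -1, 1): A raises RecursionError, B does not finish within the time limit
import Mathlib
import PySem

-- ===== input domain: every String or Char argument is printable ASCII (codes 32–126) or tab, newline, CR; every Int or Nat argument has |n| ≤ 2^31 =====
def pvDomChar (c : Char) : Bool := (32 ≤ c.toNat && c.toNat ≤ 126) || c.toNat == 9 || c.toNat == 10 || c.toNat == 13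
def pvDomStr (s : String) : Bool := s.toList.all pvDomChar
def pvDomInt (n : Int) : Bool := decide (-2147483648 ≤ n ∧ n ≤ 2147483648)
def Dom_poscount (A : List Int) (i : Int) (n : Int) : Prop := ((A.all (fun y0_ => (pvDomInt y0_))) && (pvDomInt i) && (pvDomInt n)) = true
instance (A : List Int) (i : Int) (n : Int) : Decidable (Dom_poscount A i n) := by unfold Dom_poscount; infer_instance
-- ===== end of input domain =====

-- B replaces A's recursion with an explicit LIFO stack and a running counter (alternative
-- decomposition, same cost); equivalence is about the return value on Pre_ (no observable mutation).

-- ===== PORT A =====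
-- A's recursion, made total with a fuel argument (fuel only guards termination; under
-- Pre_poscount the recursion depth is at most n.toNat, so fuel n.toNat+1 never runs out).
-- Python's A[i] (negative wraparound, IndexError) is PySem.List.pyGet?; on the none
-- (IndexError) case the port returns 0 — such inputs are outside Pre_poscount.
def poscountFuel (f : Nat) (A : List Int) (i : Int) (n : Int) : Int :=
  match f with
  | 0 => 0
  | f + 1 =>
    if i ≥ n then 0
    else
      match PySem.List.pyGet? A i with
      | none => 0
      | some v =>
        if v ≤ 0 then 0
        else
          let left := poscountFuel f A (2*i+1) n
          let right := poscountFuel f A (2*i+2) n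
          left + right + 1

def poscount (A : List Int) (i : Int) (n : Int) : Int :=
  poscountFuel (n.toNat + 1) A i n

-- ===== PORT B =====
-- B's while-loop over a stack; head of the list is the stack top (Python pops from the end,
-- and appends 2j+1 then 2j+2, so 2j+2 is popped first).  Fuel only guards termination: under
-- Pre_poscount the loop makes at most 3^((n-i).toNat+1) iterations.  As in port A, an
-- out-of-range A[j] (outside Pre_poscount) is skipped.
def poscountLoop (f : Nat) (A : List Int) (n : Int) (stack : List Int) (count : Int) : Int :=
  match f, stack with
  | 0, _ => count
  | _ + 1, [] => count
  | f + 1, j :: st =>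
    if j < n then
      match PySem.List.pyGet? A j with
      | none => poscountLoop f A n st count
      | some v =>
        if v > 0 then poscountLoop f A n ((2*j+2) :: (2*j+1) :: st) (count + 1)
        else poscountLoop f A n st count
    else poscountLoop f A n st count

def poscount_alt (A : List Int) (i : Int) (n : Int) : Int :=
  poscountLoop (3 ^ (min (n - i).toNat A.length + 1)) A n [i] 0

-- ===== PRECONDITION & SPEC =====
-- Pre_ excludes the inputs on which the recursion can reach an out-of-range index: negative
-- start indices below n (negative-index wraparound can recurse forever) and n > len(A) with
-- i < n, where A raises IndexError or RecursionError on most values and returns 0 only when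
-- pruning happens to stop it first (see cites).
def Pre_poscount (A : List Int) (i : Int) (n : Int) : Prop :=
  n ≤ i ∨ (0 ≤ i ∧ n ≤ (A.length : Int))
instance (A : List Int) (i : Int) (n : Int) : Decidable (Pre_poscount A i n) := by
  unfold Pre_poscount; infer_instance

def pvWitness_poscount : List Int × Int × Int := ([5, 3, -1, 2], 0, 4)

def Spec_poscount (A : List Int) (i : Int) (n : Int) (out : Int) : Prop := out = poscount_alt A i n
instance (A : List Int) (i : Int) (n : Int) (out : Int) : Decidable (Spec_poscount A i n out) := by unfold Spec_poscount; infer_instance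

-- ===== CLAIM (what is proved, stated in full; the proofs are below) =====
def Claim_equal_poscount : Prop := ∀ (A : List Int) (i : Int) (n : Int), Dom_poscount A i n → Pre_poscount A i n → Spec_poscount A i n (poscount A i n)

-- ===== LEMMAS AND PROOFS =====

-- one-step equation lemmas (definitional)
theorem poscountFuel_succ (f : Nat) (A : List Int) (i : Int) (n : Int) :
    poscountFuel (f + 1) A i n =
      if i ≥ n then 0
      else
        match PySem.List.pyGet? A i with
        | none => 0
        | some v =>
          if v ≤ 0 then 0
          else poscountFuel f A (2*i+1) n + poscountFuel f A (2*i+2) n + 1 := rfl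

theorem poscountLoop_nil (f : Nat) (A : List Int) (n : Int) (c : Int) :
    poscountLoop f A n [] c = c := by cases f <;> rfl

theorem poscountLoop_succ (f : Nat) (A : List Int) (n : Int) (j : Int) (st : List Int) (c : Int) :
    poscountLoop (f + 1) A n (j :: st) c =
      if j < n then
        match PySem.List.pyGet? A j with
        | none => poscountLoop f A n st c
        | some v =>
          if v > 0 then poscountLoop f A n ((2*j+2) :: (2*j+1) :: st) (c + 1)
          else poscountLoop f A n st c
      else poscountLoop f A n st c := rfl

-- poscountFuel is stable once the fuel reaches (n - i).toNat (for nonnegative i).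
theorem poscountFuel_stab (A : List Int) (n : Int) :
    ∀ (f : Nat) (i : Int), 0 ≤ i → (n - i).toNat ≤ f →
      poscountFuel (f + 1) A i n = poscountFuel f A i n := by
  intro f
  induction f with
  | zero =>
    intro i hi hf
    have hni : n ≤ i := by omega
    simp [poscountFuel, hni]
  | succ f ih =>
    intro i hi hf
    by_cases hin : i ≥ n
    · simp [poscountFuel, hin]
    · have h1 : (n - (2*i+1)).toNat ≤ f := by omega
      have h2 : (n - (2*i+2)).toNat ≤ f := by omega
      have e1 := ih (2*i+1) (by omega) h1
      have e2 := ih (2*i+2) (by omega) h2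
      conv_lhs => rw [poscountFuel_succ]
      conv_rhs => rw [poscountFuel_succ]
      simp only [hin, if_false]
      cases PySem.List.pyGet? A i with
      | none => rfl
      | some v =>
        by_cases hv : v ≤ 0
        · simp [hv]
        · simp [hv, e1, e2]

theorem poscountFuel_stabGE (A : List Int) (n : Int) (i : Int) (hi : 0 ≤ i)
    {f g : Nat} (hf : (n - i).toNat ≤ f) (hfg : f ≤ g) :
    poscountFuel g A i n = poscountFuel f A i n := by
  obtain ⟨k, rfl⟩ := Nat.exists_eq_add_of_le hfg
  induction k with
  | zero => rfl
  | succ k ih =>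
    have : f + (k + 1) = (f + k) + 1 := by omega
    rw [this, poscountFuel_stab A n (f + k) i hi (by omega), ih (by omega)]

-- weight of one stack entry, and of a whole stack (loop-termination measure / fuel bound)
def pvW (n j : Int) : Nat := 3 ^ ((n - j).toNat + 1)

def pvM (n : Int) (st : List Int) : Nat := (st.map (pvW n)).sum

-- counted value of a whole stack
def pvS (A : List Int) (n : Int) (st : List Int) : Int :=
  (st.map (fun j => poscount A j n)).sum

theorem pvW_child (n j : Int) (hj : 0 ≤ j) (hjn : j < n) (k : Int)
    (hk : 2*j + 1 ≤ k) (hk2 : k ≤ 2*j + 2) : pvW n k ≤ 3 ^ (n - j).toNat := by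
  have : (n - k).toNat + 1 ≤ (n - j).toNat := by omega
  calc pvW n k = 3 ^ ((n - k).toNat + 1) := rfl
    _ ≤ 3 ^ (n - j).toNat := Nat.pow_le_pow_right (by norm_num) this

theorem poscount_skip (A : List Int) (j n : Int) (h : j ≥ n) : poscount A j n = 0 := by
  simp [poscount, poscountFuel, h]

-- main loop invariant: with every stack entry nonnegative and enough fuel, the loop
-- returns count plus the (recursive) poscount of every stack entry.
theorem poscountLoop_eq (A : List Int) (n : Int) :
    ∀ (f : Nat) (st : List Int) (c : Int), (∀ j ∈ st, 0 ≤ j) → pvM n st ≤ f →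
      poscountLoop f A n st c = c + pvS A n st := by
  intro f
  induction f using Nat.strong_induction_on with
  | _ f ih =>
    intro st c hpos hfuel
    match st with
    | [] =>
      simp [poscountLoop_nil, pvS]
    | j :: st =>
      have hj : 0 ≤ j := hpos j (by simp)
      have hw1 : 1 ≤ pvW n j := Nat.one_le_pow _ _ (by norm_num)
      have hM : pvM n (j :: st) = pvW n j + pvM n st := by simp [pvM]
      match f with
      | 0 => omega
      | f + 1 =>
        have hf' : f < f + 1 := by omega
        by_cases hjn : j < n
        · rw [poscountLoop_succ]
          simp only [hjn, if_true]
          cases hget : PySem.List.pyGet? A j with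
          | none =>
            have : poscount A j n = 0 := by
              simp [poscount, poscountFuel, not_le.mpr hjn, hget]
            rw [ih f hf' st c (fun x hx => hpos x (by simp [hx])) (by omega)]
            simp [pvS, this]
          | some v =>
            by_cases hv : v > 0
            · simp only [hv, if_true]
              have hc1 : pvW n (2*j+1) ≤ 3 ^ (n - j).toNat :=
                pvW_child n j hj hjn _ (by omega) (by omega)
              have hc2 : pvW n (2*j+2) ≤ 3 ^ (n - j).toNat :=
                pvW_child n j hj hjn _ (by omega) (by omega)
              have hwj : pvW n j = 3 * 3 ^ (n - j).toNat := by
                simp [pvW, pow_succ]; ring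
              have hM' : pvM n ((2*j+2) :: (2*j+1) :: st) ≤ f := by
                simp only [pvM, List.map_cons, List.sum_cons] at hM hfuel ⊢
                omega
              rw [ih f hf' ((2*j+2) :: (2*j+1) :: st) (c + 1)
                    (by intro x hx; simp at hx
                        rcases hx with h | h | h
                        · omega
                        · omega
                        · exact hpos x (by simp [h]))
                    hM']
              -- unfold poscount A j n one step
              have hstep : poscount A j n
                  = poscount A (2*j+1) n + poscount A (2*j+2) n + 1 := by
                have e1 : poscountFuel (n.toNat + 1) A (2*j+1) n
                    = poscountFuel n.toNat A (2*j+1) n :=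
                  poscountFuel_stabGE A n (2*j+1) (by omega) (by omega) (by omega)
                have e2 : poscountFuel (n.toNat + 1) A (2*j+2) n
                    = poscountFuel n.toNat A (2*j+2) n :=
                  poscountFuel_stabGE A n (2*j+2) (by omega) (by omega) (by omega)
                conv_lhs => rw [poscount, poscountFuel_succ]
                rw [if_neg (not_le.mpr hjn), hget]
                show (if v ≤ 0 then 0
                  else poscountFuel n.toNat A (2*j+1) n + poscountFuel n.toNat A (2*j+2) n + 1)
                  = poscountFuel (n.toNat + 1) A (2*j+1) n
                    + poscountFuel (n.toNat + 1) A (2*j+2) n + 1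
                rw [if_neg (not_le.mpr hv), e1, e2]
              simp only [pvS, List.map_cons, List.sum_cons, hstep]
              ring
            · simp only [hv, if_false]
              have : poscount A j n = 0 := by
                simp only [poscount, poscountFuel, not_le.mpr hjn, if_false, hget]
                simp [not_lt.mp hv]
              rw [ih f hf' st c (fun x hx => hpos x (by simp [hx])) (by omega)]
              simp [pvS, this]
        · rw [poscountLoop_succ]
          simp only [hjn, if_false]
          rw [ih f hf' st c (fun x hx => hpos x (by simp [hx])) (by omega)]
          simp [pvS, poscount_skip A j n (by omega)]

-- ===== VERDICT (by name: the statement is the Claim_ definition above) =====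
theorem poscount_spec : Claim_equal_poscount := by
  intro A i n _ hpre
  unfold Spec_poscount poscount_alt
  rcases hpre with h | ⟨hi, hn⟩
  · -- i ≥ n: A returns 0 at once, B pops i, skips it, and stops with count 0
    have hni : (n - i).toNat = 0 := by omega
    have hlt : ¬ i < n := by omega
    have hfuel : 3 ^ (min (n - i).toNat A.length + 1) = 2 + 1 := by
      rw [hni]; simp
    rw [hfuel, poscountLoop_succ]
    simp [hlt, poscountLoop_nil, poscount, poscountFuel, h]
  · -- 0 ≤ i, n ≤ len A: the loop invariant with stack [i], count 0
    have hmin : min (n - i).toNat A.length = (n - i).toNat := by omega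
    rw [hmin, poscountLoop_eq A n _ [i] 0 (by simpa using hi) (by simp [pvM, pvW])]
    simp [pvS]
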